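-- pv_equiv track=rewrite | github.com/SudoKudo/RepairAudit | tools/reporting/html_report.py | _compute_filter_values
-- ===== SOURCE A (Python) =====
-- from typing import Any, Dict, List, Tuple
--
-- def _uniq(values: List[str]) -> List[str]:
--     """Return sorted unique non-empty strings."""
--     return sorted({(v or "").strip() for v in values if (v or "").strip()})
--
-- def _compute_filter_values(all_rows: List[Dict[str, Any]], strategy_rows: List[Dict[str, Any]]) -> Dict[str, Any]:
--     """Build filter option lists used by report dropdown controls."""
--     return {
--         "runs": _uniq([r.get("run_id", "") for r in all_rows]),
--         "conditions": _uniq([r.get("condition", "") for r in all_rows]),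
--         "vuln_types": _uniq([r.get("vuln_type", "") for r in all_rows]),
--         "primary_outcomes": _uniq([r.get("primary_outcome", "") for r in all_rows]),
--         "judge_verdicts": _uniq([r.get("judge_verdict", "") for r in all_rows]),
--         "judge_strategies": _uniq([r.get("strategy", "") for r in strategy_rows]),
--     }
-- ===== SOURCE B (Python) =====
-- def _compute_filter_values(all_rows, strategy_rows):
--     """Single consolidated pass over all_rows maintaining five sets, plus one
--     pass over strategy_rows, instead of six separate list scans."""
--     runs = set()
--     conditions = set()
--     vuln_types = set()
--     primary_outcomes = set()
--     judge_verdicts = set()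
--     buckets = (
--         ("run_id", runs),
--         ("condition", conditions),
--         ("vuln_type", vuln_types),
--         ("primary_outcome", primary_outcomes),
--         ("judge_verdict", judge_verdicts),
--     )
--     for r in all_rows:
--         for key, bucket in buckets:
--             v = (r.get(key, "") or "").strip()
--             if v:
--                 bucket.add(v)
--     strategies = set()
--     for r in strategy_rows:
--         v = (r.get("strategy", "") or "").strip()
--         if v:
--             strategies.add(v)
--     return {
--         "runs": sorted(runs),
--         "conditions": sorted(conditions),
--         "vuln_types": sorted(vuln_types),
--         "primary_outcomes": sorted(primary_outcomes),
--         "judge_verdicts": sorted(judge_verdicts),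
--         "judge_strategies": sorted(strategies),
--     }
-- ===== Notes on version B (the rewrite author's own statement) =====
-- stated objective: alternative
-- what changed: Replaces five per-column list comprehensions plus a set-comprehension helper with one consolidated pass over all_rows that maintains five accumulator sets (and one pass over strategy_rows), sorting each set at the end.
import Mathlib
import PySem

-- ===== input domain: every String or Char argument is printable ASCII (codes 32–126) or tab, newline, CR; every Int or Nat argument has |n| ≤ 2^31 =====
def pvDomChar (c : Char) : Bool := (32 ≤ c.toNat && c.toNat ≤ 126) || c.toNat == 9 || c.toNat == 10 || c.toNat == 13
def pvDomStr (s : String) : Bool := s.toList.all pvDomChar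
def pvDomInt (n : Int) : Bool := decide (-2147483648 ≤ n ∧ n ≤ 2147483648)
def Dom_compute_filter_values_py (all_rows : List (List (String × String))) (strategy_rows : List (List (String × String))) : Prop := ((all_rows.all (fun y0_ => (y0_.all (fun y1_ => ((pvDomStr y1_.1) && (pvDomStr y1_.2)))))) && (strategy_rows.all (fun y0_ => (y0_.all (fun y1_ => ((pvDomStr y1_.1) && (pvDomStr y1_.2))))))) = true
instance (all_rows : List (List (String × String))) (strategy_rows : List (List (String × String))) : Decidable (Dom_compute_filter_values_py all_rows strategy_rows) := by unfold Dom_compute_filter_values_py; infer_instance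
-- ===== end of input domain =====

-- B replaces A's six separate scans (one list comprehension + set-comprehension helper per
-- column) by one consolidated pass over all_rows maintaining five sets plus one pass over
-- strategy_rows (alternative decomposition, same asymptotic cost).


-- shared cleanup: Python's `(v or "").strip()`
def pvClean (v : String) : String :=
  PySem.Str.strip (if v == "" then "" else v)

-- ===== PORT A =====
-- `_uniq`: sorted({(v or "").strip() for v in values if (v or "").strip()})
def uniqA (values : List String) : List String :=
  PySem.List.sorted
    (PySem.Set.ofList ((values.map pvClean).filter (fun c => !(c == ""))))
    (fun x => x) false

def compute_filter_values_py (all_rows : List (List (String × String))) (strategy_rows : List (List (String × String))) : List (String × List String) :=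
  [("runs", uniqA (all_rows.map (fun r => (PySem.Dict.mk r).getD "run_id" ""))),
   ("conditions", uniqA (all_rows.map (fun r => (PySem.Dict.mk r).getD "condition" ""))),
   ("vuln_types", uniqA (all_rows.map (fun r => (PySem.Dict.mk r).getD "vuln_type" ""))),
   ("primary_outcomes", uniqA (all_rows.map (fun r => (PySem.Dict.mk r).getD "primary_outcome" ""))),
   ("judge_verdicts", uniqA (all_rows.map (fun r => (PySem.Dict.mk r).getD "judge_verdict" ""))),
   ("judge_strategies", uniqA (strategy_rows.map (fun r => (PySem.Dict.mk r).getD "strategy" "")))]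

-- ===== PORT B =====
-- `v = (r.get(key, "") or "").strip(); if v: bucket.add(v)`
def pvAddClean (s : PySem.Set String) (r : List (String × String)) (k : String) : PySem.Set String :=
  let v := pvClean ((PySem.Dict.mk r).getD k "")
  if v == "" then s else PySem.Set.add s v

def compute_filter_values_py_alt (all_rows : List (List (String × String))) (strategy_rows : List (List (String × String))) : List (String × List String) :=
  let st := all_rows.foldl
    (fun (p : PySem.Set String × PySem.Set String × PySem.Set String × PySem.Set String × PySem.Set String) r =>
      (pvAddClean p.1 r "run_id",
       pvAddClean p.2.1 r "condition",
       pvAddClean p.2.2.1 r "vuln_type",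
       pvAddClean p.2.2.2.1 r "primary_outcome",
       pvAddClean p.2.2.2.2 r "judge_verdict"))
    (PySem.Set.empty, PySem.Set.empty, PySem.Set.empty, PySem.Set.empty, PySem.Set.empty)
  let strategies := strategy_rows.foldl (fun s r => pvAddClean s r "strategy") PySem.Set.empty
  [("runs", PySem.List.sorted st.1 (fun x => x) false),
   ("conditions", PySem.List.sorted st.2.1 (fun x => x) false),
   ("vuln_types", PySem.List.sorted st.2.2.1 (fun x => x) false),
   ("primary_outcomes", PySem.List.sorted st.2.2.2.1 (fun x => x) false),
   ("judge_verdicts", PySem.List.sorted st.2.2.2.2 (fun x => x) false),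
   ("judge_strategies", PySem.List.sorted strategies (fun x => x) false)]

-- ===== PRECONDITION & SPEC =====
def Spec_compute_filter_values_py (all_rows : List (List (String × String))) (strategy_rows : List (List (String × String))) (out : List (String × List String)) : Prop := out = compute_filter_values_py_alt all_rows strategy_rows
instance (all_rows : List (List (String × String))) (strategy_rows : List (List (String × String))) (out : List (String × List String)) : Decidable (Spec_compute_filter_values_py all_rows strategy_rows out) := by unfold Spec_compute_filter_values_py; infer_instance

-- ===== CLAIM (what is proved, stated in full; the proofs are below) =====
def Claim_equal_compute_filter_values_py : Prop := ∀ (all_rows : List (List (String × String))) (strategy_rows : List (List (String × String))), Dom_compute_filter_values_py all_rows strategy_rows → Spec_compute_filter_values_py all_rows strategy_rows (compute_filter_values_py all_rows strategy_rows)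

-- ===== LEMMAS AND PROOFS =====

-- one column of B's fold equals the A-side set
lemma foldl_addClean (rows : List (List (String × String))) (k : String) (s : PySem.Set String) :
    rows.foldl (fun s r => pvAddClean s r k) s
    = ((rows.map (fun r => (PySem.Dict.mk r).getD k "")).map pvClean |>.filter (fun c => !(c == ""))).foldl PySem.Set.add s := by
  induction rows generalizing s with
  | nil => rfl
  | cons r t ih =>
    rw [List.foldl_cons, ih]
    simp only [List.map_cons, List.filter_cons, pvAddClean]
    by_cases h : pvClean ((PySem.Dict.mk r).getD k "") == "" <;> simp [h]

lemma foldl_addClean_empty (rows : List (List (String × String))) (k : String) :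
    rows.foldl (fun s r => pvAddClean s r k) PySem.Set.empty
    = PySem.Set.ofList ((rows.map (fun r => (PySem.Dict.mk r).getD k "")).map pvClean |>.filter (fun c => !(c == ""))) := by
  rw [foldl_addClean]; rfl

-- the consolidated five-set fold splits into five independent single-key folds
lemma foldl_quint' (l : List (List (String × String))) (a b c d e : PySem.Set String) :
    l.foldl (fun (p : PySem.Set String × PySem.Set String × PySem.Set String × PySem.Set String × PySem.Set String) r =>
        (pvAddClean p.1 r "run_id",
         pvAddClean p.2.1 r "condition",
         pvAddClean p.2.2.1 r "vuln_type",
         pvAddClean p.2.2.2.1 r "primary_outcome",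
         pvAddClean p.2.2.2.2 r "judge_verdict")) (a, b, c, d, e)
    = (l.foldl (fun s r => pvAddClean s r "run_id") a,
       l.foldl (fun s r => pvAddClean s r "condition") b,
       l.foldl (fun s r => pvAddClean s r "vuln_type") c,
       l.foldl (fun s r => pvAddClean s r "primary_outcome") d,
       l.foldl (fun s r => pvAddClean s r "judge_verdict") e) := by
  induction l generalizing a b c d e with
  | nil => rfl
  | cons x t ih => simp [List.foldl_cons, ih]

-- ===== VERDICT (by name: the statement is the Claim_ definition above) =====
theorem compute_filter_values_py_spec : Claim_equal_compute_filter_values_py := by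
  intro all_rows strategy_rows _
  unfold Spec_compute_filter_values_py compute_filter_values_py compute_filter_values_py_alt uniqA
  simp only [foldl_quint', foldl_addClean_empty]
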